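-- pv_equiv track=rewrite | github.com/ricku777-bear/diffcp | benchmarks/bench_rounding_gap.py | count_violations
-- ===== SOURCE A (Python) =====
-- def count_violations(assignment):
--     N = len(assignment)
--     v = 0
--     for i in range(N):
--         for j in range(i + 1, N):
--             if abs(int(assignment[i]) - int(assignment[j])) == abs(i - j):
--                 v += 1
--     return v
-- ===== SOURCE B (Python) =====
-- def count_violations(assignment):
--     # |a_i - a_j| == j - i  (i < j)  iff  a_i - i == a_j - j  or  a_i + i == a_j + j
--     # (never both for i != j), so one pass counting earlier matches per diagonal key.
--     diag = {}
--     anti = {}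
--     v = 0
--     for i, a in enumerate(assignment):
--         k1 = a - i
--         k2 = a + i
--         v += diag.get(k1, 0) + anti.get(k2, 0)
--         diag[k1] = diag.get(k1, 0) + 1
--         anti[k2] = anti.get(k2, 0) + 1
--     return v
-- ===== Notes on version B (the rewrite author's own statement) =====
-- stated objective: faster
-- what changed: Replaced the O(N^2) all-pairs scan by a single pass that hashes each element by its diagonal keys a[i]-i and a[i]+i and counts earlier matches in two dicts.
import Mathlib
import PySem

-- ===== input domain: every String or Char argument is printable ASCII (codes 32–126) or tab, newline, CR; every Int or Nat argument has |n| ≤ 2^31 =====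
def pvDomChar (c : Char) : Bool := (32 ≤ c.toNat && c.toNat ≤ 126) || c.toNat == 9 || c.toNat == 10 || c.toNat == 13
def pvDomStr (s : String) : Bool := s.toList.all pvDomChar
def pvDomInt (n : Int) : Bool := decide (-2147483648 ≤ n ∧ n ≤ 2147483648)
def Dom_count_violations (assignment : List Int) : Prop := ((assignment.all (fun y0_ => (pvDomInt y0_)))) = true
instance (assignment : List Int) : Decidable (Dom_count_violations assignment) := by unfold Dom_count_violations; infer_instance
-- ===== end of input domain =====

-- B replaces A's O(N^2) pair scan by one pass over two diagonal-key counters (measured faster).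


-- ===== PORT A =====
-- literal port of A's double index loop; assignment[i] is pyGetD (index always in range),
-- int(x) is the identity on ints, abs is |·| on Int
def count_violations (assignment : List Int) : Int :=
  let N := PySem.List.len assignment
  (PySem.List.pyRange 0 N).foldl (fun v i =>
    (PySem.List.pyRange (i + 1) N).foldl (fun v j =>
      if |PySem.List.pyGetD assignment i 0 - PySem.List.pyGetD assignment j 0| = |i - j|
      then v + 1 else v) v) 0

-- ===== PORT B =====
-- literal port of Source B: one pass over enumerate, two dicts counting the diagonal keys
-- a - i and a + i, v adds the earlier matches before the counters are bumped
def count_violations_alt (assignment : List Int) : Int :=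
  ((PySem.List.enumerate assignment).foldl
    (fun (st : PySem.Dict Int Int × PySem.Dict Int Int × Int) p =>
      let k1 := p.2 - p.1
      let k2 := p.2 + p.1
      (st.1.insert k1 (st.1.getD k1 0 + 1),
       st.2.1.insert k2 (st.2.1.getD k2 0 + 1),
       st.2.2 + st.1.getD k1 0 + st.2.1.getD k2 0))
    (PySem.Dict.empty, PySem.Dict.empty, 0)).2.2

-- ===== PRECONDITION & SPEC =====
def Spec_count_violations (assignment : List Int) (out : Int) : Prop := out = count_violations_alt assignment
instance (assignment : List Int) (out : Int) : Decidable (Spec_count_violations assignment out) := by unfold Spec_count_violations; infer_instance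

-- ===== CLAIM (what is proved, stated in full; the proofs are below) =====
def Claim_equal_count_violations : Prop := ∀ (assignment : List Int), Dom_count_violations assignment → Spec_count_violations assignment (count_violations assignment)

-- ===== LEMMAS AND PROOFS =====

-- number of (unordered) pairs of entries of ks on the same diagonal plus those on the same antidiagonal
def pvPairF : List (Int × Int) → Int
  | [] => 0
  | p :: ps => (ps.countP (fun q => q.2 - q.1 == p.2 - p.1) : Int)
             + (ps.countP (fun q => q.2 + q.1 == p.2 + p.1) : Int) + pvPairF ps

theorem pvPairF_snoc (ks : List (Int × Int)) (p : Int × Int) :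
    pvPairF (ks ++ [p]) = pvPairF ks
      + (ks.countP (fun q => q.2 - q.1 == p.2 - p.1) : Int)
      + (ks.countP (fun q => q.2 + q.1 == p.2 + p.1) : Int) := by
  induction ks with
  | nil => simp [pvPairF]
  | cons r ks ih =>
    simp only [List.cons_append, pvPairF, List.countP_append, List.countP_cons,
      List.countP_nil, ih, beq_iff_eq]
    have h1 : ((p.2 - p.1 = r.2 - r.1) ↔ (r.2 - r.1 = p.2 - p.1)) := eq_comm
    have h2 : ((p.2 + p.1 = r.2 + r.1) ↔ (r.2 + r.1 = p.2 + p.1)) := eq_comm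
    simp only [h1, h2]
    push_cast
    split_ifs <;> omega

-- B's loop characterised: the two dicts are counters of the diagonal keys, v is pvPairF
theorem pvB_char (ks : List (Int × Int)) :
    ks.foldl
      (fun (st : PySem.Dict Int Int × PySem.Dict Int Int × Int) p =>
        let k1 := p.2 - p.1
        let k2 := p.2 + p.1
        (st.1.insert k1 (st.1.getD k1 0 + 1),
         st.2.1.insert k2 (st.2.1.getD k2 0 + 1),
         st.2.2 + st.1.getD k1 0 + st.2.1.getD k2 0))
      (PySem.Dict.empty, PySem.Dict.empty, 0)
    = ((ks.map (fun p => p.2 - p.1)).foldl (fun d x => d.insert x (d.getD x 0 + 1)) PySem.Dict.empty,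
       (ks.map (fun p => p.2 + p.1)).foldl (fun d x => d.insert x (d.getD x 0 + 1)) PySem.Dict.empty,
       pvPairF ks) := by
  induction ks using List.reverseRecOn with
  | nil => rfl
  | append_singleton ks p ih =>
    rw [List.foldl_append, ih]
    simp only [List.foldl_cons, List.foldl_nil, List.map_append, List.map_cons, List.map_nil,
      List.foldl_append, PySem.Dict.getD_foldl_insert_add_one, PySem.Dict.getD_empty,
      pvPairF_snoc]
    refine Prod.ext rfl (Prod.ext rfl ?_)
    simp only [List.count_eq_countP, List.countP_map, zero_add]
    rfl

theorem pvAlt_eq_pairF (assignment : List Int) :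
    count_violations_alt assignment = pvPairF (PySem.List.enumerate assignment) := by
  unfold count_violations_alt
  rw [pvB_char]

-- the pair condition of A splits, for i < j, into the exclusive diagonal/antidiagonal matches
theorem pvCountSplit (p : Int × Int) (ps : List (Int × Int)) (h : ∀ q ∈ ps, p.1 < q.1) :
    ((ps.countP (fun q => decide (|p.2 - q.2| = |p.1 - q.1|)) : Int))
      = (ps.countP (fun q => q.2 - q.1 == p.2 - p.1) : Int)
      + (ps.countP (fun q => q.2 + q.1 == p.2 + p.1) : Int) := by
  induction ps with
  | nil => simp
  | cons q ps ih =>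
    have hq : p.1 < q.1 := h q (List.mem_cons_self ..)
    have ih' := ih (fun r hr => h r (List.mem_cons_of_mem _ hr))
    have habs : (|p.2 - q.2| = |p.1 - q.1|) ↔ ((p.2 - q.2).natAbs = (p.1 - q.1).natAbs) := by
      rw [Int.abs_eq_natAbs, Int.abs_eq_natAbs]; exact Int.natCast_inj
    simp only [List.countP_cons, decide_eq_true_eq, beq_iff_eq, habs]
    split_ifs <;> push_cast <;> omega

-- the j-range from k, paired with the values, is the tail of enumerate
theorem pvMapRange (assignment : List Int) (k : Nat) (hk : k ≤ assignment.length) :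
    (PySem.List.pyRange (k : Int) (PySem.List.len assignment)).map
      (fun j => (j, PySem.List.pyGetD assignment j 0))
    = (PySem.List.enumerate assignment).drop k := by
  rw [PySem.List.enumerate_eq_map_pyRange assignment 0]
  rw [show PySem.List.pyRange 0 (PySem.List.len assignment)
      = PySem.List.pyRange 0 (k : Int) ++ PySem.List.pyRange (k : Int) (PySem.List.len assignment)
    from PySem.List.pyRange_one_append 0 k _ (by exact_mod_cast Nat.zero_le k)
      (by rw [PySem.List.len_eq]; exact_mod_cast hk)]
  rw [List.map_append, List.drop_left' (by simp [PySem.List.length_pyRange_one])]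

theorem pvOuter (assignment : List Int) (n a : Nat) (hn : a + n = assignment.length) (v0 : Int) :
    (PySem.List.pyRange (a : Int) (PySem.List.len assignment)).foldl (fun v i =>
      (PySem.List.pyRange (i + 1) (PySem.List.len assignment)).foldl (fun v j =>
        if |PySem.List.pyGetD assignment i 0 - PySem.List.pyGetD assignment j 0| = |i - j|
        then v + 1 else v) v) v0
    = v0 + pvPairF ((PySem.List.enumerate assignment).drop a) := by
  induction n generalizing a v0 with
  | zero =>
    rw [PySem.List.pyRange_one_eq_nil (by rw [PySem.List.len_eq]; exact_mod_cast (by omega : assignment.length ≤ a))]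
    rw [List.drop_eq_nil_of_le (by rw [PySem.List.length_enumerate]; omega)]
    simp [pvPairF]
  | succ n ih =>
    have ha : (a : Int) < PySem.List.len assignment := by
      rw [PySem.List.len_eq]; exact_mod_cast by omega
    rw [PySem.List.pyRange_one_cons ha, List.foldl_cons]
    have hdrop := pvMapRange assignment (a + 1) (by omega)
    have hdropa := pvMapRange assignment a (by omega)
    have hcons : (PySem.List.enumerate assignment).drop a
        = ((a : Int), PySem.List.pyGetD assignment (a : Int) 0)
          :: (PySem.List.enumerate assignment).drop (a + 1) := by
      rw [← hdrop, ← hdropa, PySem.List.pyRange_one_cons ha, List.map_cons]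
      push_cast; ring_nf
    rw [PySem.List.foldl_ite_add_one]
    rw [show ((a : Int) + 1) = (((a + 1 : Nat)) : Int) by push_cast; ring]
    rw [ih (a + 1) (by omega)]
    have hcount :
        (List.countP (fun j => decide (|PySem.List.pyGetD assignment (a : Int) 0 - PySem.List.pyGetD assignment j 0| = |(a : Int) - j|))
          (PySem.List.pyRange ((a + 1 : Nat) : Int) (PySem.List.len assignment)) : Int)
        = (((PySem.List.enumerate assignment).drop (a + 1)).countP
            (fun q => q.2 - q.1 == PySem.List.pyGetD assignment (a : Int) 0 - (a : Int)) : Int)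
          + (((PySem.List.enumerate assignment).drop (a + 1)).countP
            (fun q => q.2 + q.1 == PySem.List.pyGetD assignment (a : Int) 0 + (a : Int)) : Int) := by
      rw [← pvCountSplit ((a : Int), PySem.List.pyGetD assignment (a : Int) 0) _ ?side]
      · rw [← hdrop, List.countP_map]
        rfl
      case side =>
        intro q hq
        rw [← hdrop] at hq
        simp only [List.mem_map] at hq
        obtain ⟨j, hj, rfl⟩ := hq
        have := (PySem.List.mem_pyRange_one.mp hj).1
        simp only
        omega
    rw [hcons]
    simp only [pvPairF]
    rw [hcount]
    ring
theorem pvA_eq_pairF (assignment : List Int) :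
    count_violations assignment = pvPairF (PySem.List.enumerate assignment) := by
  unfold count_violations
  have := pvOuter assignment assignment.length 0 (by omega) 0
  simpa using this

-- ===== VERDICT (by name: the statement is the Claim_ definition above) =====
theorem count_violations_spec : Claim_equal_count_violations := by
  intro assignment _
  unfold Spec_count_violations
  rw [pvA_eq_pairF, pvAlt_eq_pairF]
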